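-- pv_equiv track=rewrite | github.com/Khip01/sentiment-analysis | sentiment-analysis_rule-based/utils/preprocessing.py | counting_grade
-- ===== SOURCE A (Python) =====
-- def counting_grade(words: list[tuple[str, int]]) -> tuple[int, int]:
--     positive_count: int = 0
--     negative_count: int = 0
--
--     for word in words:
--         current_grade = word[1]
--         if current_grade == 1:
--             positive_count += 1
--         elif current_grade == -1:
--             negative_count += 1
--
--     return positive_count, negative_count
-- ===== SOURCE B (Python) =====
-- def counting_grade(words: list[tuple[str, int]]) -> tuple[int, int]:
--     grades = [w[1] for w in words]
--     return grades.count(1), grades.count(-1)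
-- ===== Notes on version B (the rewrite author's own statement) =====
-- stated objective: idiomatic
-- what changed: Replaces the single branching accumulator loop with extracting the grade list once and counting +1 and -1 via list.count, removing the if/elif state machine.
import Mathlib
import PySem

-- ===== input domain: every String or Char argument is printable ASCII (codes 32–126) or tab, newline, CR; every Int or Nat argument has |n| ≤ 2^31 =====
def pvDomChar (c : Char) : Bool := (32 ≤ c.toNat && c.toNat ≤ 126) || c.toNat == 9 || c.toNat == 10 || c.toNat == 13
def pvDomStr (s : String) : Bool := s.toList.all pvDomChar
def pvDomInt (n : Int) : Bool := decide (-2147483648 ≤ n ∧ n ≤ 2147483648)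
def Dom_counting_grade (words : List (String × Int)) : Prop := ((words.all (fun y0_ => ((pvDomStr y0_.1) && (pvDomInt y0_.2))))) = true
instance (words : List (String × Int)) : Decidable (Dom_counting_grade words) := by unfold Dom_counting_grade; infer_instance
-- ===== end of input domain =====

-- B counts the +1 and -1 grades with list.count over the extracted grade list instead of a branching accumulator loop (idiomatic).


-- ===== PORT A =====
def counting_grade (words : List (String × Int)) : Int × Int :=
  let st := words.foldl (fun acc word =>
    let current_grade := word.2
    if current_grade = 1 then (acc.1 + 1, acc.2)
    else if current_grade = -1 then (acc.1, acc.2 + 1)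
    else acc) ((0 : Int), (0 : Int))
  (st.1, st.2)

-- ===== PORT B =====
def counting_grade_alt (words : List (String × Int)) : Int × Int :=
  let grades := words.map (fun w => w.2)
  ((PySem.List.count grades 1 : Int), (PySem.List.count grades (-1) : Int))

-- ===== PRECONDITION & SPEC =====
def Spec_counting_grade (words : List (String × Int)) (out : Int × Int) : Prop := out = counting_grade_alt words
instance (words : List (String × Int)) (out : Int × Int) : Decidable (Spec_counting_grade words out) := by unfold Spec_counting_grade; infer_instance

-- ===== CLAIM (what is proved, stated in full; the proofs are below) =====
def Claim_equal_counting_grade : Prop := ∀ (words : List (String × Int)), Dom_counting_grade words → Spec_counting_grade words (counting_grade words)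

-- ===== LEMMAS AND PROOFS =====
theorem counting_grade_fold (words : List (String × Int)) (p n : Int) :
    words.foldl (fun acc (word : String × Int) =>
      let current_grade := word.2
      if current_grade = 1 then (acc.1 + 1, acc.2)
      else if current_grade = -1 then (acc.1, acc.2 + 1)
      else acc) (p, n)
    = (p + ((words.map (fun w => w.2)).count 1 : Int),
       n + ((words.map (fun w => w.2)).count (-1) : Int)) := by
  induction words generalizing p n with
  | nil => simp
  | cons w ws ih =>
    simp only [List.foldl_cons, List.map_cons]
    by_cases h1 : w.2 = 1
    · simp [h1, ih, List.count_cons]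
      ring
    · by_cases h2 : w.2 = -1
      · simp [h1, h2, ih]
        ring
      · simp [h1, h2, ih]

-- ===== VERDICT (by name: the statement is the Claim_ definition above) =====
theorem counting_grade_spec : Claim_equal_counting_grade := by
  intro words _
  unfold Spec_counting_grade counting_grade counting_grade_alt
  simp [counting_grade_fold, PySem.List.count_eq]
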